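-- pv_equiv track=rewrite | github.com/torstenvolk/rfactory | GitHub Stars by Org.py | count_stars_by_date
-- ===== SOURCE A (Python) =====
-- def count_stars_by_date(star_dates, days_ago):
--     star_counts = [0] * len(days_ago)
--     index = 0
--     for i, day in enumerate(days_ago):
--         while index < len(star_dates) and star_dates[index] <= day:
--             index += 1
--         star_counts[i] = index
--     return star_counts
-- ===== SOURCE B (Python) =====
-- def count_stars_by_date(star_dates, days_ago):
--     # Transposed two-pointer: iterate over star_dates, marking at which day
--     # each star is consumed, then prefix-sum the per-day marks.
--     marks = [0] * len(days_ago)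
--     i = 0
--     for s in star_dates:
--         while i < len(days_ago) and days_ago[i] < s:
--             i += 1
--         if i == len(days_ago):
--             break
--         marks[i] += 1
--     res = []
--     total = 0
--     for c in marks:
--         total += c
--         res.append(total)
--     return res
-- ===== Notes on version B (the rewrite author's own statement) =====
-- stated objective: alternative
-- what changed: Transposes the two-pointer merge: instead of looping over days_ago and advancing an index into star_dates, B loops over star_dates, marks the day at which each star is consumed, and prefix-sums the per-day marks.
import Mathlib
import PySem

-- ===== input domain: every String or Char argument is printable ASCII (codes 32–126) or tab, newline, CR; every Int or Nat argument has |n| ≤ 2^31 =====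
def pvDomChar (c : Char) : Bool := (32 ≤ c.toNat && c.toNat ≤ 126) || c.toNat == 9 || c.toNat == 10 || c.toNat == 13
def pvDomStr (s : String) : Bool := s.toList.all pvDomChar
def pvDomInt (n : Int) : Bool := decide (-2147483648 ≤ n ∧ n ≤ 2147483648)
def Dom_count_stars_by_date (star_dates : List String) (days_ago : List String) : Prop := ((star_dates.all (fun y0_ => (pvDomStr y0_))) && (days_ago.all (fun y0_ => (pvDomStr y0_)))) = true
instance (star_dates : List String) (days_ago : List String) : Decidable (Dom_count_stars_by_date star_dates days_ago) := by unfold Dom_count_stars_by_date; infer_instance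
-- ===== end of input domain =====

-- B transposes A's two-pointer scan (outer loop over star_dates marking consumption days,
-- then a prefix sum) instead of A's outer loop over days_ago; objective: alternative.

-- ===== PORT A =====
-- A's inner `while index < len(star_dates) and star_dates[index] <= day: index += 1`
def aAdvance (star_dates : List String) (day : String) (index : Nat) : Nat :=
  if h : index < star_dates.length then
    if star_dates[index] ≤ day then aAdvance star_dates day (index + 1) else index
  else index
termination_by star_dates.length - index

-- A's `for i, day in enumerate(days_ago): … star_counts[i] = index`
def aLoop (star_dates : List String) (days : List String) (index : Nat) : List Int :=
  match days with
  | [] => []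
  | d :: rest =>
    let index' := aAdvance star_dates d index
    (index' : Int) :: aLoop star_dates rest index'

def count_stars_by_date (star_dates : List String) (days_ago : List String) : List Int :=
  aLoop star_dates days_ago 0

-- ===== PORT B =====
-- B's inner `while i < len(days_ago) and days_ago[i] < s: i += 1`
def bAdvance (days : List String) (s : String) (i : Nat) : Nat :=
  if h : i < days.length then
    if days[i] < s then bAdvance days s (i + 1) else i
  else i
termination_by days.length - i

-- B's `for s in star_dates: … if i == len(days_ago): break; marks[i] += 1`
def bMark (days : List String) (sds : List String) (i : Nat) (marks : List Int) : List Int :=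
  match sds with
  | [] => marks
  | s :: t =>
    let i' := bAdvance days s i
    if i' = days.length then marks
    else bMark days t i' (marks.modify i' (· + 1))

-- B's prefix-sum loop `for c in marks: total += c; res.append(total)`
def bSum (marks : List Int) (total : Int) : List Int :=
  match marks with
  | [] => []
  | c :: t => (total + c) :: bSum t (total + c)

def count_stars_by_date_alt (star_dates : List String) (days_ago : List String) : List Int :=
  bSum (bMark days_ago star_dates 0 (List.replicate days_ago.length 0)) 0

-- ===== PRECONDITION & SPEC =====
def Spec_count_stars_by_date (star_dates : List String) (days_ago : List String) (out : List Int) : Prop := out = count_stars_by_date_alt star_dates days_ago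
instance (star_dates : List String) (days_ago : List String) (out : List Int) : Decidable (Spec_count_stars_by_date star_dates days_ago out) := by unfold Spec_count_stars_by_date; infer_instance

-- ===== CLAIM (what is proved, stated in full; the proofs are below) =====
def Claim_equal_count_stars_by_date : Prop := ∀ (star_dates : List String) (days_ago : List String), Dom_count_stars_by_date star_dates days_ago → Spec_count_stars_by_date star_dates days_ago (count_stars_by_date star_dates days_ago)

-- ===== LEMMAS AND PROOFS =====

-- length of the longest prefix of `l` whose elements are ≤ d
def prefLe (l : List String) (d : String) : Nat :=
  match l with
  | [] => 0
  | s :: t => if s ≤ d then prefLe t d + 1 else 0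

-- length of the longest prefix of `l` whose elements are < s
def prefLt (l : List String) (s : String) : Nat :=
  match l with
  | [] => 0
  | d :: t => if d < s then prefLt t s + 1 else 0

-- the common "merge" specification: per day, consume the ≤-prefix of the remaining stars
def mrg (sds : List String) (days : List String) (k : Nat) : List Int :=
  match days with
  | [] => []
  | d :: rest =>
    let n := prefLe sds d
    ((k + n : Nat) : Int) :: mrg (sds.drop n) rest (k + n)

theorem aAdvance_eq (star_dates : List String) (d : String) (index : Nat) :
    aAdvance star_dates d index = index + prefLe (star_dates.drop index) d := by
  fun_induction aAdvance star_dates d index with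
  | case1 index h hle ih =>
      rw [ih, List.drop_eq_getElem_cons h]
      simp [prefLe, hle]; omega
  | case2 index h hle =>
      rw [List.drop_eq_getElem_cons h]
      simp [prefLe, hle]
  | case3 index h =>
      rw [List.drop_eq_nil_of_le (by omega)]
      simp [prefLe]

theorem bAdvance_eq (days : List String) (s : String) (i : Nat) :
    bAdvance days s i = i + prefLt (days.drop i) s := by
  fun_induction bAdvance days s i with
  | case1 i h hlt ih =>
      rw [ih, List.drop_eq_getElem_cons h]
      simp [prefLt, hlt]; omega
  | case2 i h hlt =>
      rw [List.drop_eq_getElem_cons h]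
      simp [prefLt, hlt]
  | case3 i h =>
      rw [List.drop_eq_nil_of_le (by omega)]
      simp [prefLt]

theorem aLoop_eq_mrg (days sds : List String) (index : Nat) :
    aLoop sds days index = mrg (sds.drop index) days index := by
  induction days generalizing index with
  | nil => simp [aLoop, mrg]
  | cons d rest ih =>
      simp only [aLoop, mrg, aAdvance_eq]
      rw [ih, List.drop_drop]

-- shifting both lists by one position commutes with bMark
theorem bMark_cons (days : List String) (d : String) (sds : List String) (c0 : Int)
    (marks : List Int) (j : Nat) :
    bMark (d :: days) sds (j + 1) (c0 :: marks) = c0 :: bMark days sds j marks := by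
  induction sds generalizing j marks with
  | nil => simp [bMark]
  | cons s t ih =>
      have hadv : bAdvance (d :: days) s (j + 1) = bAdvance days s j + 1 := by
        rw [bAdvance_eq, bAdvance_eq]
        simp [List.drop_succ_cons]; omega
      simp only [bMark, hadv, List.length_cons]
      by_cases hb : bAdvance days s j = days.length
      · simp [hb]
      · have : ¬ (bAdvance days s j + 1 = days.length + 1) := by omega
        simp only [if_neg this, if_neg hb]
        rw [List.modify_succ_cons, ih]

-- one day's worth of B's marking: the ≤-prefix of the stars is consumed at the head day
theorem bMark_head (days : List String) (d : String) (sds : List String) (c0 : Int)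
    (marks : List Int) :
    bMark (d :: days) sds 0 (c0 :: marks) =
      (c0 + (prefLe sds d : Int)) :: bMark days (sds.drop (prefLe sds d)) 0 marks := by
  induction sds generalizing c0 with
  | nil => simp [bMark, prefLe]
  | cons s t ih =>
      by_cases hle : s ≤ d
      · have hadv : bAdvance (d :: days) s 0 = 0 := by
          unfold bAdvance
          simp [not_lt_of_ge hle]
        have hne : ¬ (0 = days.length + 1) := by omega
        simp only [bMark, hadv, List.length_cons, if_neg hne, List.modify_zero_cons]
        rw [ih]
        simp only [prefLe, if_pos hle, List.drop_succ_cons]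
        congr 1
        push_cast
        ring
      · have hd : d < s := lt_of_not_ge hle
        have hadv : bAdvance (d :: days) s 0 = bAdvance days s 0 + 1 := by
          rw [bAdvance_eq, bAdvance_eq]
          simp only [List.drop_zero, prefLt, if_pos hd]
          omega
        simp only [bMark, hadv, List.length_cons, prefLe, if_neg hle, List.drop_zero,
          Nat.cast_zero, add_zero]
        by_cases hb : bAdvance days s 0 = days.length
        · simp only [if_pos (by omega : bAdvance days s 0 + 1 = days.length + 1), if_pos hb]
        · simp only [if_neg (by omega : ¬ (bAdvance days s 0 + 1 = days.length + 1)), if_neg hb,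
            List.modify_succ_cons]
          rw [bMark_cons]

theorem bMark_nil (sds : List String) (marks : List Int) :
    bMark [] sds 0 marks = marks := by
  cases sds with
  | nil => rfl
  | cons s t =>
      simp [bMark, bAdvance]

theorem b_eq_mrg (days sds : List String) (k : Nat) :
    bSum (bMark days sds 0 (List.replicate days.length 0)) (k : Int) = mrg sds days k := by
  induction days generalizing sds k with
  | nil => simp [bMark_nil, bSum, mrg]
  | cons d rest ih =>
      simp only [List.length_cons, List.replicate_succ]
      rw [bMark_head]
      simp only [bSum, mrg]
      have : ((k : Int) + (0 + (prefLe sds d : Int))) = ((k + prefLe sds d : Nat) : Int) := by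
        push_cast; ring
      rw [this, ih]

-- ===== VERDICT (by name: the statement is the Claim_ definition above) =====
theorem count_stars_by_date_spec : Claim_equal_count_stars_by_date := by
  intro sds days _
  unfold Spec_count_stars_by_date count_stars_by_date count_stars_by_date_alt
  rw [aLoop_eq_mrg]
  simpa using (b_eq_mrg days sds 0).symm
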